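-- pv_equiv track=rewrite | github.com/SOUNDS-RESEARCH/aspsim | ancsim/experiment/multiexperimentutils.py | findChangingEntries
-- ===== SOURCE A (Python) =====
-- import itertools as it
--
-- def findChangingEntries(settings):
--     changingEntries = []
--     for entry in settings:
--         for val1,val2 in it.combinations(settings[entry],2):
--             if val1 != val2:
--                 changingEntries.append(entry)
--                 break
--     return changingEntries
-- ===== SOURCE B (Python) =====
-- def findChangingEntries(settings):
--     return [entry for entry, vals in settings.items() if len(set(vals)) > 1]
-- ===== Notes on version B (the rewrite author's own statement) =====
-- stated objective: idiomatic
-- what changed: Replaces the nested loop over all pairwise combinations (with a break) by a single comprehension that deduplicates each entry's values into a set and keeps the entry when more than one distinct value remains.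
import Mathlib
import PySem

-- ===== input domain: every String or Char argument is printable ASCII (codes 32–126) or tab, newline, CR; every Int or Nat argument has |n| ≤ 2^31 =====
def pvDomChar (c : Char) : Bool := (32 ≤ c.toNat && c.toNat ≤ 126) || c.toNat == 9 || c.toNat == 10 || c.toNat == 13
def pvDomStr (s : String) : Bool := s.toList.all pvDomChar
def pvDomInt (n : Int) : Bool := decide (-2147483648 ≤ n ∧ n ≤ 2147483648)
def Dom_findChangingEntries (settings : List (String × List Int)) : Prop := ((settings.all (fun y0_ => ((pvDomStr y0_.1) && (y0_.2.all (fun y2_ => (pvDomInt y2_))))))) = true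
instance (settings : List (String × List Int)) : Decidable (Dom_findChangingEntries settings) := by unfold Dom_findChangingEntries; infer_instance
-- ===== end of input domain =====

-- B replaces A's pairwise-combinations scan per entry by deduplicating the values into a set
-- and checking for more than one distinct value (idiomatic; same return value on every dict).


-- ===== PORT A =====
-- inner loop: 'for val1,val2 in it.combinations(settings[entry],2): if val1 != val2: append entry; break'
-- (the unpacking 'val1,val2 = p' is ported as pyGetD p 0/1 with dummy default 0; exact since
-- every member of combinations vals 2 has length 2)
def pvInnerA (entry : String) (pairs : List (List Int)) (acc : List String) : List String :=
  match pairs with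
  | [] => acc
  | p :: rest =>
      if PySem.List.pyGetD p 0 0 ≠ PySem.List.pyGetD p 1 0 then acc ++ [entry]
      else pvInnerA entry rest acc

def findChangingEntries (settings : List (String × List Int)) : List String :=
  settings.foldl
    (fun acc kv =>
      pvInnerA kv.1
        (PySem.List.combinations (((PySem.Dict.mk settings).get? kv.1).getD []) 2) acc)
    []

-- ===== PORT B =====
def findChangingEntries_alt (settings : List (String × List Int)) : List String :=
  settings.filterMap
    (fun kv => if 1 < (PySem.Set.ofList kv.2).length then some kv.1 else none)

-- ===== PRECONDITION & SPEC =====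
-- Pre_ excludes association lists with duplicate keys: a Python dict cannot contain them,
-- so no Python input reaches A with duplicate keys (the list form is an artefact of the encoding).
def Pre_findChangingEntries (settings : List (String × List Int)) : Prop :=
  (settings.map Prod.fst).Nodup
instance (settings : List (String × List Int)) : Decidable (Pre_findChangingEntries settings) := by unfold Pre_findChangingEntries; infer_instance
def pvWitness_findChangingEntries : (List (String × List Int)) := [("a", [1, 2]), ("b", [3, 3])]

def Spec_findChangingEntries (settings : List (String × List Int)) (out : List String) : Prop := out = findChangingEntries_alt settings
instance (settings : List (String × List Int)) (out : List String) : Decidable (Spec_findChangingEntries settings out) := by unfold Spec_findChangingEntries; infer_instance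

-- ===== CLAIM (what is proved, stated in full; the proofs are below) =====
def Claim_equal_findChangingEntries : Prop := ∀ (settings : List (String × List Int)), Dom_findChangingEntries settings → Pre_findChangingEntries settings → Spec_findChangingEntries settings (findChangingEntries settings)

-- ===== LEMMAS AND PROOFS =====

-- A's inner loop appends the entry once iff some pair differs
theorem pvInnerA_eq (e : String) (ps : List (List Int)) (acc : List String) :
    pvInnerA e ps acc =
      acc ++ (if ps.any (fun p => PySem.List.pyGetD p 0 0 ≠ PySem.List.pyGetD p 1 0)
              then [e] else []) := by
  induction ps with
  | nil => simp [pvInnerA]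
  | cons p rest ih =>
      by_cases h : PySem.List.pyGetD p 0 0 ≠ PySem.List.pyGetD p 1 0
      · simp [pvInnerA, h]
      · simp [pvInnerA, h, ih]

-- some pair of vs differs iff vs is not pairwise-equal
theorem pvAnyDiff_eq (vs : List Int) :
    ((PySem.List.combinations vs 2).any
        (fun p => PySem.List.pyGetD p 0 0 ≠ PySem.List.pyGetD p 1 0))
      = !(decide (vs.Pairwise (· = ·))) := by
  induction vs with
  | nil => simp
  | cons x t ih =>
      rw [show (2 : Nat) = 1 + 1 from rfl, PySem.List.combinations_cons_succ,
        PySem.List.combinations_one, show (1 : Nat) + 1 = 2 from rfl]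
      rw [List.any_append, ih, List.map_map, List.any_map]
      simp only [Function.comp_def]
      have hred : ∀ y : Int,
          (decide (PySem.List.pyGetD [x, y] 0 0 ≠ PySem.List.pyGetD [x, y] 1 0))
            = !decide (x = y) := by
        intro y
        simp [PySem.List.pyGetD, PySem.List.pyIdx?, PySem.List.pyGet?]
      simp only [hred]
      by_cases h1 : ∀ y ∈ t, x = y
      · have ha : (t.any fun y => !decide (x = y)) = false := by
          simp only [List.any_eq_false]
          intro y hy; simp [h1 y hy]
        simp [ha, List.pairwise_cons]
        intro y hy hne
        exact absurd (h1 y hy) hne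
      · push_neg at h1
        obtain ⟨y, hy, hxy⟩ := h1
        have ha : (t.any fun y => !decide (x = y)) = true :=
          List.any_eq_true.mpr ⟨y, hy, by simpa using hxy⟩
        have hnp : ¬ (x :: t).Pairwise (· = ·) := by
          intro h; exact hxy ((List.pairwise_cons.mp h).1 y hy)
        simp [ha, hnp]

-- set(x::t) is {x} when every element of t equals x
theorem pvOfList_all (x : Int) (t : List Int) (h : ∀ y ∈ t, x = y) :
    PySem.Set.ofList (x :: t) = [x] := by
  have h0 : PySem.Set.ofList (x :: t) = t.foldl PySem.Set.add [x] := by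
    rw [PySem.Set.ofList_eq_foldl]
    simp [PySem.Set.add, PySem.Set.contains]
  rw [h0]
  clear h0
  induction t with
  | nil => rfl
  | cons y s ih =>
      have hy : x = y := h y (List.mem_cons_self ..)
      have hadd : PySem.Set.add [x] y = [x] := by
        simp [PySem.Set.add, PySem.Set.contains, hy]
      rw [List.foldl_cons, hadd]
      exact ih (fun z hz => h z (List.mem_cons_of_mem _ hz))

-- the set of vs has more than one element iff vs is not pairwise-equal
theorem pvSetLen_eq (vs : List Int) :
    (decide (1 < (PySem.Set.ofList vs).length)) = !(decide (vs.Pairwise (· = ·))) := by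
  rcases vs with _ | ⟨x, t⟩
  · simp [PySem.Set.ofList]
  · by_cases hall : ∀ y ∈ t, x = y
    · have hset : PySem.Set.ofList (x :: t) = [x] := pvOfList_all x t hall
      have hpw : (x :: t).Pairwise (· = ·) := by
        refine List.pairwise_cons.mpr ⟨hall, List.pairwise_of_forall_mem_list ?_⟩
        intro a ha b hb
        exact (hall a ha).symm.trans (hall b hb)
      simp [hset, hpw]
    · push_neg at hall
      obtain ⟨y, hy, hxy⟩ := hall
      have hxm : x ∈ PySem.Set.ofList (x :: t) := by
        rw [PySem.Set.mem_ofList]; exact List.mem_cons_self ..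
      have hym : y ∈ PySem.Set.ofList (x :: t) := by
        rw [PySem.Set.mem_ofList]; exact List.mem_cons_of_mem _ hy
      have hlen : 1 < (PySem.Set.ofList (x :: t)).length := by
        by_contra hle
        push_neg at hle
        interval_cases h : (PySem.Set.ofList (x :: t)).length
        · exact absurd hxm (by simp [List.length_eq_zero_iff.mp h])
        · obtain ⟨z, hz⟩ := List.length_eq_one_iff.mp h
          rw [hz] at hxm hym
          simp at hxm hym
          exact hxy (hxm.trans hym.symm)
      have hnpw : ¬ (x :: t).Pairwise (· = ·) := by
        intro h
        exact hxy ((List.pairwise_cons.mp h).1 y hy)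
      simp [hlen, hnpw]

-- with nodup keys, the lookup of a member's key returns that member's value
theorem pvLookup_self {settings : List (String × List Int)}
    (hnd : (settings.map Prod.fst).Nodup) {kv : String × List Int} (hm : kv ∈ settings) :
    (((PySem.Dict.mk settings).get? kv.1)).getD [] = kv.2 := by
  have hk : (PySem.Dict.mk settings).keys.Nodup := by
    simpa [PySem.Dict.keys] using hnd
  have hi : (kv.1, kv.2) ∈ (PySem.Dict.mk settings).items := by
    simpa [PySem.Dict.items] using hm
  rw [PySem.Dict.get?_of_mem_items _ hi hk]
  rfl

-- B's filterMap written as a flatMap of singleton-or-empty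
theorem pvAlt_eq_flatMap (settings : List (String × List Int)) :
    findChangingEntries_alt settings
      = settings.flatMap
          (fun kv => if 1 < (PySem.Set.ofList kv.2).length then [kv.1] else []) := by
  unfold findChangingEntries_alt
  induction settings with
  | nil => rfl
  | cons kv tl ih =>
      by_cases h : 1 < (PySem.Set.ofList kv.2).length
      · simp [h, ih]
      · simp [h, ih]

-- ===== VERDICT (by name: the statement is the Claim_ definition above) =====
theorem findChangingEntries_spec : Claim_equal_findChangingEntries := by
  intro settings _ hpre
  unfold Spec_findChangingEntries findChangingEntries
  rw [pvAlt_eq_flatMap]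
  have hcongr :
      settings.foldl
        (fun acc kv =>
          pvInnerA kv.1
            (PySem.List.combinations (((PySem.Dict.mk settings).get? kv.1).getD []) 2) acc)
        []
      = settings.foldl
          (fun acc kv => acc ++ (if 1 < (PySem.Set.ofList kv.2).length then [kv.1] else []))
          [] := by
    apply PySem.List.foldl_congr_mem
    intro acc kv hm
    rw [pvInnerA_eq, pvLookup_self hpre hm]
    have h := (pvAnyDiff_eq kv.2).trans (pvSetLen_eq kv.2).symm
    rw [h]
    by_cases hc : 1 < (PySem.Set.ofList kv.2).length
    · simp [hc]
    · simp [hc]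
  rw [hcongr, PySem.List.foldl_append_eq_flatMap]
  rfl
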